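-- pv_equiv track=rewrite | github.com/yonama/MachineLearningAPI | components/aprioricompo.py | __support_func
-- ===== SOURCE A (Python) =====
-- def __support_func(num,idata,xlst):
--     isum,usum=set(range(num)),set()
--     for x in xlst:
--         if x in idata:
--             isum=isum.intersection(set(idata[x]))
--             usum=usum.union(set(idata[x]))
--     lisum,lusum=len(isum),len(usum)
--     if lusum==0:lisum=0
--     return lisum,lusum
-- ===== SOURCE B (Python) =====
-- def __support_func(num, idata, xlst):
--     m = 0
--     counter = {}
--     for x in xlst:
--         if x in idata:
--             m += 1
--             for e in set(idata[x]):
--                 counter[e] = counter.get(e, 0) + 1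
--     lusum = len(counter)
--     lisum = sum(1 for e, c in counter.items() if c == m and 0 <= e < num)
--     return lisum, lusum
-- ===== Notes on version B (the rewrite author's own statement) =====
-- stated objective: faster
-- what changed: B replaces A's fold of set-intersections/unions seeded with set(range(num)) by a single frequency-counter pass (per element: in how many of the m matched deduplicated lists it occurs; union size = number of counter keys, intersection size = in-range keys with count m); intended as faster since it never materialises set(range(num)) — measured 5.4x at n=262144 in one timing run, 1.6x in another.
import Mathlib
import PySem

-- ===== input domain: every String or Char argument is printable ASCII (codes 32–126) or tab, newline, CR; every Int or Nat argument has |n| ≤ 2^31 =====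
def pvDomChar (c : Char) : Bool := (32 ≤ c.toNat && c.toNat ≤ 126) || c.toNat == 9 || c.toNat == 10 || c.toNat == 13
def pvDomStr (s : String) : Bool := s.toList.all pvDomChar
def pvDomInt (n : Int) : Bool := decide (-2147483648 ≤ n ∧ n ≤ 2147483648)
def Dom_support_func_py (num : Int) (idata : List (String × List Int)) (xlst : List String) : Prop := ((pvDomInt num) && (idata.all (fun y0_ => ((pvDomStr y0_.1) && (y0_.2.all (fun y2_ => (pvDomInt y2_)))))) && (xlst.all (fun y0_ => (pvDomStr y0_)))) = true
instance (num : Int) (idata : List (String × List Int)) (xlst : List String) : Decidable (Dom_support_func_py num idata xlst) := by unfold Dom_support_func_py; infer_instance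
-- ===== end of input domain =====

-- B replaces A's set(range(num))-seeded intersection/union folding with a single element-frequency
-- counter pass (alternative decomposition; avoids materialising range(num)).

-- ===== PORT A =====
def support_func_py (num : Int) (idata : List (String × List Int)) (xlst : List String) : Int × Int :=
  let d : PySem.Dict String (List Int) := PySem.Dict.mk idata
  let st := xlst.foldl (fun (s : PySem.Set Int × PySem.Set Int) x =>
      match d.get? x with
      | some l => (PySem.Set.inter s.1 (PySem.Set.ofList l), PySem.Set.union s.2 (PySem.Set.ofList l))
      | none => s)
    -- set(range(num)): the range has distinct elements, so it is its own Set
    -- (PySem.Set.ofList_eq_self_of_nodup with PySem.List.nodup_pyRange_one)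
    ((PySem.List.pyRange 0 num : PySem.Set Int), PySem.Set.empty)
  let lisum : Int := PySem.Set.len st.1
  let lusum : Int := PySem.Set.len st.2
  (if lusum == 0 then 0 else lisum, lusum)

-- ===== PORT B =====
def support_func_py_alt (num : Int) (idata : List (String × List Int)) (xlst : List String) : Int × Int :=
  let d : PySem.Dict String (List Int) := PySem.Dict.mk idata
  let st := xlst.foldl (fun (s : Int × PySem.Dict Int Int) x =>
      match d.get? x with
      | some l => (s.1 + 1, (PySem.Set.ofList l).foldl (fun c e => c.insert e (c.getD e 0 + 1)) s.2)
      | none => s)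
    (0, PySem.Dict.empty)
  let lusum : Int := (st.2.size : Int)
  let lisum : Int :=
    (st.2.items.countP (fun p => p.2 == st.1 && decide ((0:Int) ≤ p.1) && decide (p.1 < num)) : Int)
  (lisum, lusum)

-- ===== PRECONDITION & SPEC =====
def Spec_support_func_py (num : Int) (idata : List (String × List Int)) (xlst : List String) (out : Int × Int) : Prop := out = support_func_py_alt num idata xlst
instance (num : Int) (idata : List (String × List Int)) (xlst : List String) (out : Int × Int) : Decidable (Spec_support_func_py num idata xlst out) := by unfold Spec_support_func_py; infer_instance

-- ===== CLAIM (what is proved, stated in full; the proofs are below) =====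
def Claim_equal_support_func_py : Prop := ∀ (num : Int) (idata : List (String × List Int)) (xlst : List String), Dom_support_func_py num idata xlst → Spec_support_func_py num idata xlst (support_func_py num idata xlst)

-- ===== LEMMAS AND PROOFS =====

-- Invariant tying A's running (isum, usum) sets to B's running (m, counter) state.
def pvInv (num m : Int) (c : PySem.Dict Int Int) (isum usum : PySem.Set Int) : Prop :=
  isum.Nodup ∧ usum.Nodup ∧ c.keys.Nodup ∧
  (∀ e : Int, e ∈ usum ↔ e ∈ c.keys) ∧
  (∀ e ∈ c.keys, 1 ≤ c.getD e 0) ∧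
  (∀ e : Int, 0 ≤ c.getD e 0 ∧ c.getD e 0 ≤ m) ∧
  (∀ e : Int, e ∈ isum ↔ (0 ≤ e ∧ e < num ∧ c.getD e 0 = m))

lemma pvCounterStep (l : List Int) (c : PySem.Dict Int Int) (e : Int) :
    ((PySem.Set.ofList l).foldl (fun c e => c.insert e (c.getD e 0 + 1)) c).getD e 0
      = c.getD e 0 + (if e ∈ l then 1 else 0) := by
  rw [PySem.Dict.getD_foldl_insert_add_one]
  by_cases h : e ∈ l
  · rw [List.count_eq_one_of_mem (PySem.Set.nodup_ofList l) ((PySem.Set.mem_ofList l e).2 h)]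
    simp [h]
  · rw [List.count_eq_zero_of_not_mem (fun hm => h ((PySem.Set.mem_ofList l e).1 hm))]
    simp [h]

lemma pvInvStep (num m : Int) (c : PySem.Dict Int Int) (isum usum : PySem.Set Int)
    (l : List Int) (h : pvInv num m c isum usum) :
    pvInv num (m + 1) ((PySem.Set.ofList l).foldl (fun c e => c.insert e (c.getD e 0 + 1)) c)
      (PySem.Set.inter isum (PySem.Set.ofList l)) (PySem.Set.union usum (PySem.Set.ofList l)) := by
  obtain ⟨hi, hu, hk, husum, hpos, hbd, hisum⟩ := h
  have hkeys : ((PySem.Set.ofList l).foldl (fun c e => c.insert e (c.getD e 0 + 1)) c).keys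
      = PySem.Set.update c.keys (PySem.Set.ofList l) :=
    PySem.Dict.keys_foldl_insert (PySem.Set.ofList l) (fun d x => d.getD x 0 + 1) c
  refine ⟨PySem.Set.nodup_inter _ _ hi, PySem.Set.nodup_union _ _ hu,
    PySem.Dict.nodup_keys_foldl_insert _ _ _ hk, ?_, ?_, ?_, ?_⟩
  · intro e
    rw [PySem.Set.mem_union, hkeys, PySem.Set.mem_update, PySem.Set.mem_ofList, husum e]
  · intro e he
    rw [hkeys, PySem.Set.mem_update, PySem.Set.mem_ofList] at he
    rw [pvCounterStep]
    rcases he with he | he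
    · have := hpos e he
      have := (hbd e).1
      split
      · omega
      · omega
    · have := (hbd e).1
      simp [he]
      omega
  · intro e
    rw [pvCounterStep]
    have := hbd e
    split
    all_goals omega
  · intro e
    rw [PySem.Set.mem_inter, pvCounterStep, hisum e, PySem.Set.mem_ofList]
    have := hbd e
    by_cases hel : e ∈ l
    · simp [hel]
    · simp [hel]
      omega

lemma pvFoldInv (num : Int) (d : PySem.Dict String (List Int)) :
    ∀ (xlst : List String) (isum usum : PySem.Set Int) (m : Int) (c : PySem.Dict Int Int),
    pvInv num m c isum usum →
    pvInv num
      (xlst.foldl (fun (s : Int × PySem.Dict Int Int) x =>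
        match d.get? x with
        | some l => (s.1 + 1, (PySem.Set.ofList l).foldl (fun c e => c.insert e (c.getD e 0 + 1)) s.2)
        | none => s) (m, c)).1
      (xlst.foldl (fun (s : Int × PySem.Dict Int Int) x =>
        match d.get? x with
        | some l => (s.1 + 1, (PySem.Set.ofList l).foldl (fun c e => c.insert e (c.getD e 0 + 1)) s.2)
        | none => s) (m, c)).2
      (xlst.foldl (fun (s : PySem.Set Int × PySem.Set Int) x =>
        match d.get? x with
        | some l => (PySem.Set.inter s.1 (PySem.Set.ofList l), PySem.Set.union s.2 (PySem.Set.ofList l))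
        | none => s) (isum, usum)).1
      (xlst.foldl (fun (s : PySem.Set Int × PySem.Set Int) x =>
        match d.get? x with
        | some l => (PySem.Set.inter s.1 (PySem.Set.ofList l), PySem.Set.union s.2 (PySem.Set.ofList l))
        | none => s) (isum, usum)).2 := by
  intro xlst
  induction xlst with
  | nil => intro isum usum m c h; exact h
  | cons x xs ih =>
    intro isum usum m c h
    simp only [List.foldl_cons]
    cases hx : d.get? x with
    | none => exact ih isum usum m c h
    | some l => exact ih _ _ _ _ (pvInvStep num m c isum usum l h)

lemma pvInvInit (num : Int) :
    pvInv num 0 PySem.Dict.empty ((PySem.List.pyRange 0 num : PySem.Set Int)) PySem.Set.empty := by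
  refine ⟨PySem.List.nodup_pyRange_one 0 num, List.nodup_nil, by simp [PySem.Dict.keys_empty], ?_, ?_, ?_, ?_⟩
  · intro e; simp [PySem.Set.empty, PySem.Dict.keys_empty]
  · intro e he; simp [PySem.Dict.keys_empty] at he
  · intro e; simp [PySem.Dict.getD_empty]
  · intro e
    rw [PySem.List.mem_pyRange_one]
    simp [PySem.Dict.getD_empty]

lemma pvExtract (num m : Int) (c : PySem.Dict Int Int) (isum usum : PySem.Set Int)
    (h : pvInv num m c isum usum) :
    ((if PySem.Set.len usum == 0 then 0 else PySem.Set.len isum), PySem.Set.len usum)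
      = ((c.items.countP (fun p => p.2 == m && decide ((0:Int) ≤ p.1) && decide (p.1 < num)) : Int),
         (c.size : Int)) := by
  obtain ⟨hi, hu, hk, husum, hpos, hbd, hisum⟩ := h
  have hperm : usum.Perm c.keys := (List.perm_ext_iff_of_nodup hu hk).2 husum
  have hlen : usum.length = c.keys.length := hperm.length_eq
  have hkl : c.keys.length = c.items.length := by
    simp [PySem.Dict.keys]
  have hus : PySem.Set.len usum = (c.size : Int) := by
    simp [PySem.Set.len, PySem.Dict.size, hlen, hkl]
  by_cases hnil : c.keys = []
  · have hit : c.items = [] := List.map_eq_nil_iff.1 (by rw [← PySem.Dict.keys]; exact hnil)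
    have husnil : usum = [] := by
      apply List.eq_nil_iff_forall_not_mem.2
      intro e he
      rw [husum e, hnil] at he
      exact (List.not_mem_nil).elim he
    rw [husnil, hit]
    simp [PySem.Set.len, PySem.Dict.size, hit]
  · obtain ⟨e0, he0⟩ := List.exists_mem_of_ne_nil c.keys hnil
    have hm1 : 1 ≤ m := le_trans (hpos e0 he0) (hbd e0).2
    have husne : usum ≠ [] := by
      intro hcon
      rw [hcon] at husum
      exact hnil (List.eq_nil_iff_forall_not_mem.2 (fun e he => List.not_mem_nil ((husum e).2 he)))
    have hlu : ¬ (PySem.Set.len usum == 0) = true := by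
      simp [PySem.Set.len]
      intro hcon
      exact husne hcon
    rw [if_neg hlu, hus]
    refine Prod.ext ?_ rfl
    -- count over items = count over keys
    rw [PySem.Dict.items_eq_map_keys c hk 0, List.countP_map]
    -- switch to a filtered-keys length and compare with isum by permutation
    rw [List.countP_eq_length_filter]
    have hmemf : ∀ e : Int, e ∈ c.keys.filter
        ((fun p => p.2 == m && decide ((0:Int) ≤ p.1) && decide (p.1 < num)) ∘
          (fun k => (k, c.getD k 0))) ↔ e ∈ isum := by
      intro e
      rw [List.mem_filter, hisum e]
      constructor
      · rintro ⟨hek, hq⟩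
        simp at hq
        exact ⟨hq.1.2, hq.2, hq.1.1⟩
      · rintro ⟨h1, h2, h3⟩
        have hek : e ∈ c.keys := by
          by_contra hnk
          have : c.getD e 0 = 0 := PySem.Dict.getD_of_not_contains c 0
            (by
              rw [Bool.eq_false_iff]
              intro hcon
              exact hnk ((PySem.Dict.contains_iff_mem_keys c e).1 hcon))
          omega
        refine ⟨hek, ?_⟩
        simp
        exact ⟨⟨h3, h1⟩, h2⟩
    have hpf : (c.keys.filter _).Perm isum :=
      (List.perm_ext_iff_of_nodup (hk.filter _) hi).2 hmemf
    rw [hpf.length_eq]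
    simp [PySem.Set.len]

-- ===== VERDICT (by name: the statement is the Claim_ definition above) =====
theorem support_func_py_spec : Claim_equal_support_func_py := by
  intro num idata xlst _
  unfold Spec_support_func_py support_func_py support_func_py_alt
  simp only []
  have h := pvFoldInv num (PySem.Dict.mk idata) xlst
    ((PySem.List.pyRange 0 num : PySem.Set Int)) PySem.Set.empty 0 PySem.Dict.empty
    (pvInvInit num)
  exact pvExtract num _ _ _ _ h
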